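-- pv_equiv track=rewrite | github.com/907riley/CPSC322-Disc-Golf-Project | mysklearn/pokemonDiscretizers.py | base_happiness_discretizer
-- ===== SOURCE A (Python) =====
-- def base_happiness_discretizer(x):
--     """Runs a list of base_happiness values through a discretizer
--        [0.0, 46.67, 93.33, 140.0]
--     Args:
--         x (list): the list of values to discretize
--     Returns:
--         classification: The list of discretizied values
--     """
--     classification = []
--     for val in x:
--         if val > 93.33:
--             classification.append(3)
--         elif val > 46.67:
--             classification.append(2)
--         else:
--             classification.append(1)
--     return classification
-- ===== SOURCE B (Python) =====
-- def base_happiness_discretizer(x):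
--     """Equal-width binning: the range [0, 140] is split into 3 equal bins
--     (as the docstring's cut points [0.0, 46.67, 93.33, 140.0] are its thirds);
--     compute each value's bin index by floor division and clamp to the end bins."""
--     span, bins = 140, 3
--     return [min(bins, max(1, val * bins // span + 1)) for val in x]
-- ===== Notes on version B (the rewrite author's own statement) =====
-- stated objective: alternative
-- what changed: Replaces the threshold branch ladder by arithmetic equal-width binning: the bin index is computed as val*3 // 140 + 1 (the cut points are the thirds of [0, 140]) and clamped to the range 1..3, returned via a comprehension.
import Mathlib
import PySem

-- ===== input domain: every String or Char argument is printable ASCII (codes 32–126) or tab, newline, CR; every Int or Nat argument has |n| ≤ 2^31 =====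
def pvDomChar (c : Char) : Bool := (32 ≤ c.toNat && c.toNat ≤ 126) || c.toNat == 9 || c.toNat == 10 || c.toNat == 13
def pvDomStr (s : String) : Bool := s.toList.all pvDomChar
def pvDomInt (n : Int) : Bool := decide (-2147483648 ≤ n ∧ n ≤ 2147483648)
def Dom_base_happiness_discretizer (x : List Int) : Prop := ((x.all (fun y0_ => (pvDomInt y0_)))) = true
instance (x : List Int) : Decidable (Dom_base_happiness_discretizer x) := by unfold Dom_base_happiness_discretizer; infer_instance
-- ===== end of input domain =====

-- B replaces A's threshold branch ladder by arithmetic equal-width binning (floor-divide by the bin width, clamp); same O(n) cost.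

-- ===== PORT A =====
-- literal port of A's append loop with the branch ladder; on Int inputs 'val > 93.33' is 'val > 93' and 'val > 46.67' is 'val > 46' (exact for integers)
def base_happiness_discretizer (x : List Int) : List Int :=
  x.foldl (fun classification val =>
    if val > 93 then classification ++ [3]
    else if val > 46 then classification ++ [2]
    else classification ++ [1]) []

-- ===== PORT B =====
-- literal port of Source B: bin index by floor division (span = 140, bins = 3), clamped to the range 1..3
def base_happiness_discretizer_alt (x : List Int) : List Int :=
  x.map (fun val => min 3 (max 1 (PySem.Int.floordiv (val * 3) 140 + 1)))

-- ===== PRECONDITION & SPEC =====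
def Spec_base_happiness_discretizer (x : List Int) (out : List Int) : Prop := out = base_happiness_discretizer_alt x
instance (x : List Int) (out : List Int) : Decidable (Spec_base_happiness_discretizer x out) := by unfold Spec_base_happiness_discretizer; infer_instance

-- ===== CLAIM (what is proved, stated in full; the proofs are below) =====
def Claim_equal_base_happiness_discretizer : Prop := ∀ (x : List Int), Dom_base_happiness_discretizer x → Spec_base_happiness_discretizer x (base_happiness_discretizer x)

-- ===== LEMMAS AND PROOFS =====
-- per-element agreement: the clamped floor-division bin index equals the ladder's bin
theorem bhd_elem (val : Int) :
    (if val > 93 then (3 : Int) else if val > 46 then 2 else 1)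
      = min 3 (max 1 (PySem.Int.floordiv (val * 3) 140 + 1)) := by
  rw [PySem.Int.floordiv_eq_ediv_of_pos (by omega)]
  split_ifs with h1 h2 <;> omega

-- the append-folding loop with any accumulator equals acc ++ B's map
theorem bhd_foldl_acc (x : List Int) (acc : List Int) :
    x.foldl (fun classification val =>
      if val > 93 then classification ++ [3]
      else if val > 46 then classification ++ [2]
      else classification ++ [1]) acc
    = acc ++ x.map (fun val => min 3 (max 1 (PySem.Int.floordiv (val * 3) 140 + 1))) := by
  induction x generalizing acc with
  | nil => simp
  | cons v xs ih =>
    rw [List.foldl_cons, ih, List.map_cons, ← bhd_elem v]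
    split_ifs <;> simp

-- ===== VERDICT (by name: the statement is the Claim_ definition above) =====
theorem base_happiness_discretizer_spec : Claim_equal_base_happiness_discretizer := by
  intro x _
  unfold Spec_base_happiness_discretizer base_happiness_discretizer base_happiness_discretizer_alt
  simpa using bhd_foldl_acc x []
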